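-- pv_equiv track=rewrite | github.com/elizayounger29/hackerrank | Week1/testattempt1.py | vertical_sort
-- ===== SOURCE A (Python) =====
-- def vertical_sort(matrix):
--     row_number = len(matrix)
--     row_length = len(matrix[0])
--
--     for element in range(row_length):
--         temp = []
--         for row in range(row_number):
--             temp.append(matrix[row][element])
--         if temp[0] < temp[-1]:
--             temp.reverse()
--         # temp = sorted(temp, reverse=True)
--         for new_row in range(row_number):
--             matrix[new_row][element] = temp[new_row]
--     return matrix
-- ===== SOURCE B (Python) =====
-- def vertical_sort(matrix):
--     n = len(matrix)
--     for c in range(len(matrix[0])):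
--         if matrix[0][c] < matrix[n - 1][c]:
--             i, j = 0, n - 1
--             while i < j:
--                 matrix[i][c], matrix[j][c] = matrix[j][c], matrix[i][c]
--                 i += 1
--                 j -= 1
--     return matrix
-- ===== Notes on version B (the rewrite author's own statement) =====
-- stated objective: alternative
-- what changed: Per column, the copy-into-temp / reverse / write-back passes are replaced by a pre-check of the top and bottom entries followed by an in-place two-pointer swap, so no temporary column list is built and columns that need no change are not rewritten.
import Mathlib
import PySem

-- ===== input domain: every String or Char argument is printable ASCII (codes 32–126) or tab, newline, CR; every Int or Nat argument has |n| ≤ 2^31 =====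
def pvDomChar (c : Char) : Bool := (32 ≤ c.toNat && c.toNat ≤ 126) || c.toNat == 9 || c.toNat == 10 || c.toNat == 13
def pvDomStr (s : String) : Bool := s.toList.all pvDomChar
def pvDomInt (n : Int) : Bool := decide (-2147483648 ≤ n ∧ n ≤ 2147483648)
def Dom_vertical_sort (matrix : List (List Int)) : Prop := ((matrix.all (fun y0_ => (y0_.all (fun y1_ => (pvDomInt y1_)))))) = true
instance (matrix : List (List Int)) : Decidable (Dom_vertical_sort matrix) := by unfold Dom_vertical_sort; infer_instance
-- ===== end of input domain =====

-- B replaces A's copy-into-temp / reverse / write-back per column by an in-place two-pointer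
-- column swap (alternative decomposition, same cost). Both Pythons mutate `matrix` in place
-- identically and return it; the theorems are about the returned value.

-- ===== PORT A =====
-- Reads matrix[row][element] totalised with getD (Pre_ keeps every such index in range);
-- temp[0] / temp[-1] become getD 0 / getLastD (temp is nonempty under Pre_).
def vertical_sort (matrix : List (List Int)) : List (List Int) :=
  let row_number := matrix.length
  let row_length := (matrix.headD []).length
  (List.range row_length).foldl (fun m element =>
    let temp := (List.range row_number).foldl
      (fun acc row => acc ++ [(m.getD row []).getD element 0]) []
    let temp := if temp.getD 0 0 < temp.getLastD 0 then temp.reverse else temp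
    (List.range row_number).foldl
      (fun m2 new_row => m2.set new_row ((m2.getD new_row []).set element (temp.getD new_row 0))) m)
    matrix

-- ===== PORT B =====
-- the while i < j loop of Source B (termination: j - i shrinks)
def swapColAux (c : Nat) (i j : Nat) (m : List (List Int)) : List (List Int) :=
  if i < j then
    let vi := (m.getD i []).getD c 0
    let vj := (m.getD j []).getD c 0
    let m1 := m.set i ((m.getD i []).set c vj)
    let m2 := m1.set j ((m1.getD j []).set c vi)
    swapColAux c (i + 1) (j - 1) m2
  else m
termination_by j - i
decreasing_by omega

def vertical_sort_alt (matrix : List (List Int)) : List (List Int) :=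
  let n := matrix.length
  (List.range ((matrix.headD []).length)).foldl (fun m c =>
    if (m.getD 0 []).getD c 0 < (m.getD (n - 1) []).getD c 0 then
      swapColAux c 0 (n - 1) m
    else m) matrix

-- ===== PRECONDITION & SPEC =====
-- Pre_ excludes exactly the inputs on which Python A raises IndexError: the empty matrix
-- (matrix[0]) and matrices with a row shorter than the first row (matrix[row][element]).
def Pre_vertical_sort (matrix : List (List Int)) : Prop :=
  matrix ≠ [] ∧ ∀ row ∈ matrix, (matrix.headD []).length ≤ row.length
instance (matrix : List (List Int)) : Decidable (Pre_vertical_sort matrix) := by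
  unfold Pre_vertical_sort; infer_instance

def pvWitness_vertical_sort : List (List Int) := [[1, 4], [2, 3], [5, 6]]

def Spec_vertical_sort (matrix : List (List Int)) (out : List (List Int)) : Prop := out = vertical_sort_alt matrix
instance (matrix : List (List Int)) (out : List (List Int)) : Decidable (Spec_vertical_sort matrix out) := by unfold Spec_vertical_sort; infer_instance

-- ===== CLAIM (what is proved, stated in full; the proofs are below) =====
def Claim_equal_vertical_sort : Prop := ∀ (matrix : List (List Int)), Dom_vertical_sort matrix → Pre_vertical_sort matrix → Spec_vertical_sort matrix (vertical_sort matrix)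

-- ===== LEMMAS AND PROOFS =====

-- small getD facts used throughout
theorem getD_set_self (l : List (List Int)) (s : Nat) (v : List Int) (h : s < l.length) :
    (l.set s v).getD s [] = v := by
  rw [List.getD_eq_getElem?_getD, List.getElem?_set_self h]; rfl

theorem getD_set_ne (l : List (List Int)) (s r : Nat) (v : List Int) (h : r ≠ s) :
    (l.set s v).getD r [] = l.getD r [] := by
  rw [List.getD_eq_getElem?_getD, List.getElem?_set_ne (by omega), ← List.getD_eq_getElem?_getD]

theorem getD_out (l : List (List Int)) (r : Nat) (h : l.length ≤ r) :
    l.getD r [] = [] := by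
  rw [List.getD_eq_getElem?_getD, List.getElem?_eq_none h]; rfl

-- l.set c (l.getD c 0) = l
theorem set_getD_self (l : List Int) (c : Nat) : l.set c (l.getD c 0) = l := by
  induction l generalizing c with
  | nil => rfl
  | cons a t ih =>
    cases c with
    | zero => simp [List.getD]
    | succ k => simp [List.set, List.getD] at *; exact ih k

-- the append loop builds init ++ map
theorem foldl_append_map (f : Nat → Int) (l : List Nat) (init : List Int) :
    l.foldl (fun acc r => acc ++ [f r]) init = init ++ l.map f := by
  induction l generalizing init with
  | nil => simp
  | cons a t ih => simp [List.foldl, ih]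

-- temp entries
theorem temp_getD (m : List (List Int)) (n e r : Nat) (hn : m.length = n) :
    (((List.range n).map (fun r => (m.getD r []).getD e 0)).getD r 0)
      = (m.getD r []).getD e 0 := by
  by_cases h : r < n
  · rw [List.getD_eq_getElem?_getD]
    simp [h]
  · rw [List.getD_eq_getElem?_getD, List.getElem?_eq_none (by simpa using h)]
    rw [getD_out m r (by omega)]
    rfl

theorem getLastD_eq_getD (l : List Int) : l.getLastD 0 = l.getD (l.length - 1) 0 := by
  rw [List.getLastD_eq_getLast?, List.getLast?_eq_getElem?, ← List.getD_eq_getElem?_getD]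

-- reversed list entries
theorem reverse_getD (l : List Int) (r : Nat) (h : r < l.length) :
    l.reverse.getD r 0 = l.getD (l.length - 1 - r) 0 := by
  rw [List.getD_eq_getElem?_getD, List.getD_eq_getElem?_getD]
  rw [List.getElem?_eq_getElem (by simpa using h),
      List.getElem?_eq_getElem (by omega)]
  simp [List.getElem_reverse]

-- write-back loop characterisation: foldl over range k
def writeBack (e : Nat) (t : List Int) (m : List (List Int)) (k : Nat) : List (List Int) :=
  (List.range k).foldl
    (fun m2 r => m2.set r ((m2.getD r []).set e (t.getD r 0))) m

theorem writeBack_succ (e : Nat) (t : List Int) (m : List (List Int)) (k : Nat) :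
    writeBack e t m (k + 1) =
      (writeBack e t m k).set k (((writeBack e t m k).getD k []).set e (t.getD k 0)) := by
  unfold writeBack
  rw [List.range_succ, List.foldl_append, List.foldl_cons, List.foldl_nil]

theorem writeBack_length (e : Nat) (t : List Int) (m : List (List Int)) (k : Nat) :
    (writeBack e t m k).length = m.length := by
  induction k with
  | zero => rfl
  | succ k ih => rw [writeBack_succ, List.length_set, ih]

theorem writeBack_getD (e : Nat) (t : List Int) (m : List (List Int)) (k r : Nat) :
    (writeBack e t m k).getD r [] =
      if r < k then (m.getD r []).set e (t.getD r 0) else m.getD r [] := by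
  induction k with
  | zero => simp [writeBack]
  | succ k ih =>
    rw [writeBack_succ]
    by_cases hr : r = k
    · subst hr
      rw [if_pos (by omega)]
      by_cases hk : r < m.length
      · rw [getD_set_self _ _ _ (by rw [writeBack_length]; exact hk), ih,
            if_neg (by omega)]
      · rw [List.set_eq_of_length_le (by rw [writeBack_length]; omega), ih,
            if_neg (by omega), getD_out m r (by omega)]
        rfl
    · rw [getD_set_ne _ _ _ _ hr, ih]
      by_cases h1 : r < k
      · rw [if_pos h1, if_pos (by omega)]
      · rw [if_neg h1, if_neg (by omega)]

-- two-pointer swap characterisation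
theorem swapColAux_length (c i j : Nat) (m : List (List Int)) :
    (swapColAux c i j m).length = m.length := by
  induction hn : j - i using Nat.strong_induction_on generalizing i j m with
  | _ n ih =>
    unfold swapColAux
    by_cases h : i < j
    · simp only [h, if_true]
      rw [ih (j - 1 - (i + 1)) (by omega) (i + 1) (j - 1) _ rfl]
      simp
    · simp [h]

theorem swapColAux_getD (c i j : Nat) (m : List (List Int)) (r : Nat) :
    (swapColAux c i j m).getD r [] =
      if i ≤ r ∧ r ≤ j then (m.getD r []).set c ((m.getD (i + j - r) []).getD c 0)
      else m.getD r [] := by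
  induction hn : j - i using Nat.strong_induction_on generalizing i j m with
  | _ n ih =>
    unfold swapColAux
    by_cases h : i < j
    · simp only [h, if_true]
      set m1 := m.set i ((m.getD i []).set c ((m.getD j []).getD c 0)) with hm1
      set m2 := m1.set j ((m1.getD j []).set c ((m.getD i []).getD c 0)) with hm2
      have hm1len : m1.length = m.length := by rw [hm1, List.length_set]
      have hgd : ∀ s : Nat, m2.getD s [] =
          if s = i then (m.getD i []).set c ((m.getD j []).getD c 0)
          else if s = j then (m.getD j []).set c ((m.getD i []).getD c 0)
          else m.getD s [] := by
        intro s
        by_cases hsj : s = j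
        · subst hsj
          rw [if_neg (by omega), if_pos rfl]
          by_cases hjl : s < m.length
          · rw [hm2, getD_set_self _ _ _ (by rw [hm1len]; exact hjl), hm1,
                getD_set_ne _ _ _ _ (by omega)]
          · rw [hm2, List.set_eq_of_length_le (by rw [hm1len]; omega), hm1,
                getD_set_ne _ _ _ _ (by omega), getD_out m s (by omega)]
            simp
        · by_cases hsi : s = i
          · subst hsi
            rw [if_pos rfl, hm2, getD_set_ne _ _ _ _ (by omega)]
            by_cases hil : s < m.length
            · rw [hm1, getD_set_self _ _ _ hil]
            · rw [hm1, List.set_eq_of_length_le (by omega),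
                  getD_out m s (by omega)]
              simp
          · rw [if_neg hsi, if_neg hsj, hm2, getD_set_ne _ _ _ _ (by omega), hm1,
                getD_set_ne _ _ _ _ (by omega)]
      rw [ih (j - 1 - (i + 1)) (by omega) (i + 1) (j - 1) m2 rfl]
      by_cases hmid : i + 1 ≤ r ∧ r ≤ j - 1
      · rw [if_pos hmid, hgd, hgd, if_neg (by omega), if_neg (by omega),
            if_neg (by omega), if_neg (by omega), if_pos (by omega : i ≤ r ∧ r ≤ j),
            show i + 1 + (j - 1) - r = i + j - r by omega]
      · rw [if_neg hmid, hgd]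
        by_cases hri : r = i
        · subst hri
          rw [if_pos rfl, if_pos (by omega), show r + j - r = j by omega]
        · by_cases hrj : r = j
          · subst hrj
            rw [if_neg hri, if_pos rfl, if_pos (by omega), show i + r - r = i by omega]
          · rw [if_neg hri, if_neg hrj, if_neg (by omega)]
    · simp only [h, if_false]
      by_cases hr : i ≤ r ∧ r ≤ j
      · have h1 : r = i := by omega
        have h2 : i + j - r = r := by omega
        rw [if_pos hr, h2, set_getD_self]
      · rw [if_neg hr]

-- lists equal from equal lengths and equal getD
theorem eq_of_getD (a b : List (List Int)) (hl : a.length = b.length)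
    (h : ∀ r, a.getD r [] = b.getD r []) : a = b := by
  apply List.ext_getElem hl
  intro r h1 h2
  have := h r
  rwa [List.getD_eq_getElem?_getD, List.getD_eq_getElem?_getD,
       List.getElem?_eq_getElem h1, List.getElem?_eq_getElem h2] at this

-- the column step of A equals the column step of B, for any matrix state m with n rows
theorem step_eq (n e : Nat) (m : List (List Int)) (hn : m.length = n) :
    (let temp := (List.range n).foldl
        (fun acc row => acc ++ [(m.getD row []).getD e 0]) []
     let temp := if temp.getD 0 0 < temp.getLastD 0 then temp.reverse else temp
     (List.range n).foldl
       (fun m2 new_row => m2.set new_row ((m2.getD new_row []).set e (temp.getD new_row 0))) m)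
    = (if (m.getD 0 []).getD e 0 < (m.getD (n - 1) []).getD e 0 then
         swapColAux e 0 (n - 1) m
       else m) := by
  simp only
  rw [foldl_append_map (fun r => (m.getD r []).getD e 0) (List.range n) []]
  simp only [List.nil_append]
  set t0 : List Int := (List.range n).map (fun r => (m.getD r []).getD e 0) with ht0
  have ht0len : t0.length = n := by simp [ht0]
  have hg : ∀ r, t0.getD r 0 = (m.getD r []).getD e 0 := fun r => temp_getD m n e r hn
  have hcond : (t0.getD 0 0 < t0.getLastD 0) ↔
      ((m.getD 0 []).getD e 0 < (m.getD (n - 1) []).getD e 0) := by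
    rw [hg 0, getLastD_eq_getD, ht0len, hg (n - 1)]
  by_cases hc : t0.getD 0 0 < t0.getLastD 0
  · have hn0 : 0 < n := by
      by_contra hh
      have hnil : t0 = [] := by rw [ht0, show n = 0 by omega]; rfl
      rw [hnil] at hc
      simp [List.getD] at hc
    rw [if_pos hc, if_pos (hcond.mp hc)]
    have hW : ((List.range n).foldl
        (fun m2 new_row => m2.set new_row ((m2.getD new_row []).set e (t0.reverse.getD new_row 0))) m)
        = writeBack e t0.reverse m n := rfl
    apply eq_of_getD
    · rw [hW, writeBack_length, swapColAux_length]
    · intro r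
      rw [hW, writeBack_getD, swapColAux_getD]
      by_cases hr : r < n
      · rw [if_pos hr, if_pos (by omega), reverse_getD t0 r (by omega), ht0len,
            hg, show n - 1 - r = 0 + (n - 1) - r by omega]
      · rw [if_neg hr, if_neg (by omega)]
  · rw [if_neg hc, if_neg (fun h => hc (hcond.mpr h))]
    have hW : ((List.range n).foldl
        (fun m2 new_row => m2.set new_row ((m2.getD new_row []).set e (t0.getD new_row 0))) m)
        = writeBack e t0 m n := rfl
    apply eq_of_getD
    · rw [hW, writeBack_length]
    · intro r
      rw [hW, writeBack_getD]
      by_cases hr : r < n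
      · rw [if_pos hr, hg, set_getD_self]
      · rw [if_neg hr]

-- the two outer folds coincide (invariant: the number of rows stays n)
theorem fold_eq (n : Nat) (cols : List Nat) (m : List (List Int)) (hn : m.length = n) :
    cols.foldl (fun m element =>
      let temp := (List.range n).foldl
        (fun acc row => acc ++ [(m.getD row []).getD element 0]) []
      let temp := if temp.getD 0 0 < temp.getLastD 0 then temp.reverse else temp
      (List.range n).foldl
        (fun m2 new_row => m2.set new_row ((m2.getD new_row []).set element (temp.getD new_row 0))) m) m
    = cols.foldl (fun m c =>
        if (m.getD 0 []).getD c 0 < (m.getD (n - 1) []).getD c 0 then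
          swapColAux c 0 (n - 1) m
        else m) m := by
  induction cols generalizing m with
  | nil => rfl
  | cons c t ih =>
    simp only [List.foldl]
    rw [step_eq n c m hn]
    apply ih
    rw [← step_eq n c m hn]
    simp only
    exact (writeBack_length c _ m n).trans hn

-- ===== VERDICT (by name: the statement is the Claim_ definition above) =====
theorem vertical_sort_spec : Claim_equal_vertical_sort := by
  intro matrix _ _
  unfold Spec_vertical_sort vertical_sort vertical_sort_alt
  exact fold_eq matrix.length (List.range ((matrix.headD []).length)) matrix rfl
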